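-- pv_equiv track=rewrite | github.com/RussB-626/static-site-generator | src/blocknode.py | is_quote_block
-- ===== SOURCE A (Python) =====
-- def is_quote_block(text):
--     if len(text) == 0:
--         return False
--     lines = text.split('\n')
--     for line in lines:
--         if line[:2] != "> ":
--             return False
--     return True
-- ===== SOURCE B (Python) =====
-- def is_quote_block(text):
--     # A quote block is one or more lines joined by "\n", each starting with "> ".
--     # Consume one "> " line at a time, hopping from newline to newline,
--     # instead of materialising a list of lines.
--     while text.startswith("> "):
--         nl = text.find("\n")
--         if nl == -1:
--             return True
--         text = text[nl + 1:]
--     return False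
-- ===== Notes on version B (the rewrite author's own statement) =====
-- stated objective: alternative
-- what changed: Replaces split('\n')-into-a-list-of-lines plus a per-line loop by an in-place scan that repeatedly checks the '> ' prefix and jumps to the character after the next newline, never building the line list.
import Mathlib
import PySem

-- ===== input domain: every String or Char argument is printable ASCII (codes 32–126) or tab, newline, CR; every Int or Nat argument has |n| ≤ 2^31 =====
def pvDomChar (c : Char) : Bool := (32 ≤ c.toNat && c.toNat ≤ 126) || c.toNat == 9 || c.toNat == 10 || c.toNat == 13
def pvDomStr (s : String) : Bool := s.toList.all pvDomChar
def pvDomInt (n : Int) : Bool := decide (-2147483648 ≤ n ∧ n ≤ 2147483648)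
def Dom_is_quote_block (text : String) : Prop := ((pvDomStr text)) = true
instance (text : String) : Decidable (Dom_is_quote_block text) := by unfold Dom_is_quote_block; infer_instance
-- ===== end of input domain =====

-- B replaces split('\n')-into-lines + a per-line loop by an in-place scan that checks the "> " prefix and jumps past the next newline (alternative decomposition, same cost).


-- ===== PORT A =====
-- the for-loop over the split lines
def isqLoop : List String → Bool
  | [] => true
  | line :: rest =>
      if PySem.Str.slice line none (some 2) ≠ "> " then false else isqLoop rest

def is_quote_block (text : String) : Bool :=
  if PySem.Str.len text == 0 then false
  else
    -- text.split('\n'): the separator is the nonempty literal "\n", so split? is `some`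
    let lines := (PySem.Str.split? text "\n").getD []
    isqLoop lines

-- ===== PORT B =====
-- the while-loop: rebinding `text` each round becomes structural recursion on the chars
def altLoop (cs : List Char) : Bool :=
  if PySem.Chars.startswith cs ['>', ' '] then
    let nl := PySem.Chars.find cs ['\n']
    if nl = -1 then true
    else altLoop (PySem.Chars.slice cs (some (nl + 1)) none)
  else false
termination_by cs.length
decreasing_by
  have hne : PySem.Chars.find cs ['\n'] ≠ -1 := by assumption
  have hge := PySem.Chars.neg_one_le_find cs ['\n']
  have h0 : (0:Int) ≤ PySem.Chars.find cs ['\n'] := by omega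
  have hlt : (PySem.Chars.find cs ['\n']).toNat < cs.length := by
    have hpre := (PySem.Chars.find_spec (s := cs) (sub := ['\n']) h0).1
    have := hpre.length_le
    have hd : (List.drop (PySem.Chars.find cs ['\n']).toNat cs).length
        = cs.length - (PySem.Chars.find cs ['\n']).toNat := List.length_drop ..
    simp [hd] at this
    omega
  have hs : PySem.Chars.slice cs (some (PySem.Chars.find cs ['\n'] + 1)) none
      = List.drop (PySem.Chars.find cs ['\n'] + 1).toNat cs := by
    rw [PySem.Chars.slice_eq_listSlice, PySem.List.slice_from cs (by omega)]
  rw [hs, List.length_drop]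
  omega

def is_quote_block_alt (text : String) : Bool := altLoop text.toList

-- ===== PRECONDITION & SPEC =====
def Spec_is_quote_block (text : String) (out : Bool) : Prop := out = is_quote_block_alt text
instance (text : String) (out : Bool) : Decidable (Spec_is_quote_block text out) := by unfold Spec_is_quote_block; infer_instance

-- ===== CLAIM =====
def Claim_equal_is_quote_block : Prop := ∀ (text : String), Dom_is_quote_block text → Spec_is_quote_block text (is_quote_block text)

-- ===== LEMMAS AND PROOFS =====

def qlines : List Char → List (List Char)
  | [] => [[]]
  | c :: r =>
      if c = '\n' then [] :: qlines r
      else match qlines r with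
        | [] => [[c]]
        | h :: t => (c :: h) :: t

def qcheck (l : List Char) : Bool := decide (l.take 2 = ['>', ' '])

def consFirst (pre : List Char) : List (List Char) → List (List Char)
  | [] => [pre]
  | h :: t => (pre ++ h) :: t

theorem qlines_ne_nil (cs : List Char) : qlines cs ≠ [] := by
  cases cs with
  | nil => simp [qlines]
  | cons c r =>
    simp only [qlines]
    split
    · simp
    · split <;> simp

theorem splitOn_go_spec : ∀ (fuel : Nat) (l cur : List Char) (acc : List (List Char)),
    l.length ≤ fuel →
    PySem.Chars.splitOn.go ['\n'] fuel l cur acc = acc.reverse ++ consFirst cur.reverse (qlines l) := by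
  intro fuel
  induction fuel with
  | zero =>
    intro l cur acc h
    have : l = [] := by simpa using List.length_eq_zero_iff.mp (by omega)
    subst this
    simp [PySem.Chars.splitOn.go, qlines, consFirst]
  | succ fuel ih =>
    intro l cur acc h
    cases l with
    | nil => simp [PySem.Chars.splitOn.go, qlines, consFirst]
    | cons c rest =>
      by_cases hc : c = '\n'
      · subst hc
        have hp : List.isPrefixOf ['\n'] ('\n' :: rest) = true := by simp [List.isPrefixOf]
        rw [PySem.Chars.splitOn.go]
        simp only [hp, if_pos]
        have hdrop : List.drop (['\n'] : List Char).length ('\n' :: rest) = rest := by simp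
        rw [hdrop, ih rest [] _ (by simp at h; omega)]
        rcases hq : qlines rest with _ | ⟨h', t⟩
        · exact absurd hq (qlines_ne_nil rest)
        · simp [qlines, consFirst, hq]
      · have hp : List.isPrefixOf ['\n'] (c :: rest) = false := by
          simp [List.isPrefixOf]; exact fun hh => (hc hh.symm).elim
        rw [PySem.Chars.splitOn.go]
        simp only [hp]
        rw [if_neg (by simp)]
        rw [ih rest (c :: cur) acc (by simp at h; omega)]
        rcases hq : qlines rest with _ | ⟨h', t⟩
        · exact absurd hq (qlines_ne_nil rest)
        · simp [qlines, consFirst, hq, hc]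

theorem splitOn_eq_qlines (cs : List Char) : PySem.Chars.splitOn cs ['\n'] = qlines cs := by
  have := splitOn_go_spec (cs.length + 1) cs [] [] (by omega)
  rcases hq : qlines cs with _ | ⟨h', t⟩
  · exact absurd hq (qlines_ne_nil cs)
  · simpa [PySem.Chars.splitOn, consFirst, hq] using this

theorem qlines_no_nl {cs : List Char} (h : '\n' ∉ cs) : qlines cs = [cs] := by
  induction cs with
  | nil => rfl
  | cons c r ih =>
    simp only [List.mem_cons, not_or] at h
    simp [qlines, Ne.symm h.1, ih h.2]

theorem qlines_append {line : List Char} (rest : List Char) (h : '\n' ∉ line) :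
    qlines (line ++ '\n' :: rest) = line :: qlines rest := by
  induction line with
  | nil => simp [qlines]
  | cons c r ih =>
    simp only [List.mem_cons, not_or] at h
    rw [List.cons_append]
    simp only [qlines, if_neg (Ne.symm h.1 : ¬ c = '\n')]
    rw [ih h.2]

theorem prefix_cross (line rest : List Char) :
    PySem.Chars.startswith (line ++ '\n' :: rest) ['>', ' '] = qcheck line := by
  match line with
  | [] => simp [PySem.Chars.startswith, List.isPrefixOf, qcheck]
  | [a] =>
    simp [PySem.Chars.startswith, List.isPrefixOf, qcheck]
  | a :: b :: l' =>
    simp [PySem.Chars.startswith, List.isPrefixOf, qcheck, List.take]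
    rw [Bool.eq_iff_iff]
    simp only [Bool.and_eq_true, beq_iff_eq, decide_eq_true_eq]
    exact and_congr eq_comm eq_comm

theorem startswith_eq_qcheck_of_no_nl {cs : List Char} (h : '\n' ∉ cs) :
    PySem.Chars.startswith cs ['>', ' '] = qcheck cs := by
  match cs with
  | [] => rfl
  | [a] =>
    simp [PySem.Chars.startswith, List.isPrefixOf, qcheck]
  | a :: b :: l' =>
    simp [PySem.Chars.startswith, List.isPrefixOf, qcheck, List.take]
    rw [Bool.eq_iff_iff]
    simp only [Bool.and_eq_true, beq_iff_eq, decide_eq_true_eq]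
    exact and_congr eq_comm eq_comm

theorem infix_singleton_of_mem {c : Char} {cs : List Char} (h : c ∈ cs) : [c] <:+: cs := by
  obtain ⟨s, t, rfl⟩ := List.append_of_mem h
  exact ⟨s, t, by simp⟩

theorem altLoop_eq (cs : List Char) : altLoop cs = (qlines cs).all qcheck := by
  induction cs using altLoop.induct with
  | case1 cs hsw nl hnl =>
    -- startswith true, no newline
    have hno : '\n' ∉ cs := by
      intro hm
      exact ((PySem.Chars.find_eq_neg_one_iff cs ['\n']).mp hnl) (infix_singleton_of_mem hm)
    have hnl' : PySem.Chars.find cs ['\n'] = -1 := hnl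
    rw [altLoop, if_pos hsw]
    rw [if_pos hnl']
    rw [qlines_no_nl hno]
    simp only [List.all_cons, List.all_nil, Bool.and_true]
    rw [← startswith_eq_qcheck_of_no_nl hno, hsw]
  | case2 cs hsw nl hnl ih =>
    -- startswith true, newline at nl
    have hge := PySem.Chars.neg_one_le_find cs ['\n']
    have h0 : (0:Int) ≤ PySem.Chars.find cs ['\n'] := by omega
    obtain ⟨hpre, hmin⟩ := PySem.Chars.find_spec (s := cs) (sub := ['\n']) h0
    set k := (PySem.Chars.find cs ['\n']).toNat with hk
    have hlt : k < cs.length := by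
      have := hpre.length_le
      simp at this
      omega
    have hdropk : cs.drop k = '\n' :: cs.drop (k + 1) := by
      obtain ⟨t, ht⟩ := hpre
      rw [← ht]
      have : cs.drop (k+1) = (cs.drop k).drop 1 := by rw [List.drop_drop]
      rw [this, ← ht]
      simp
    have hdecomp : cs = cs.take k ++ '\n' :: cs.drop (k + 1) := by
      conv_lhs => rw [← List.take_append_drop k cs]
      rw [hdropk]
    have hnotin : '\n' ∉ cs.take k := by
      intro hmem
      obtain ⟨i, hi, hval⟩ := List.mem_iff_getElem.mp hmem
      have hik : i < k := by simp at hi; omega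
      have hic : i < cs.length := by omega
      apply hmin i hik
      have hdi : cs.drop i = cs[i] :: cs.drop (i + 1) := List.drop_eq_getElem_cons hic
      have hci : cs[i] = '\n' := by
        rw [← hval]
        exact (List.getElem_take).symm
      exact ⟨cs.drop (i + 1), by rw [hdi, hci]; rfl⟩
    have hslice : PySem.Chars.slice cs (some (PySem.Chars.find cs ['\n'] + 1)) none
        = cs.drop (k + 1) := by
      rw [PySem.Chars.slice_eq_listSlice, PySem.List.slice_from cs (by omega)]
      congr 1
      omega
    have hnl' : ¬ PySem.Chars.find cs ['\n'] = -1 := hnl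
    rw [altLoop, if_pos hsw]
    simp only [if_neg hnl']
    rw [hslice] at ih ⊢
    rw [ih]
    conv_rhs => rw [hdecomp]
    rw [qlines_append _ hnotin]
    simp only [List.all_cons]
    have hq : qcheck (cs.take k) = true := by
      rw [← prefix_cross (cs.take k) (cs.drop (k+1)), ← hdecomp, hsw]
    rw [hq, Bool.true_and]
  | case3 cs hsw =>
    rw [altLoop, if_neg hsw]
    by_cases hm : '\n' ∈ cs
    · have hdnil : cs.dropWhile (· ≠ '\n') ≠ [] := by
        intro hnil
        have := List.dropWhile_eq_nil_iff.mp hnil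
        simpa using this '\n' hm
      have hhead : (cs.dropWhile (· ≠ '\n')).head hdnil = '\n' := by
        have := List.head_dropWhile_not (p := fun x => decide (x ≠ '\n')) hdnil
        simpa using this
      have hdecomp : cs = cs.takeWhile (· ≠ '\n') ++ '\n' :: (cs.dropWhile (· ≠ '\n')).tail := by
        conv_lhs => rw [← List.takeWhile_append_dropWhile (p := fun x => decide (x ≠ '\n')) (l := cs)]
        have hct := List.cons_head_tail hdnil
        rw [hhead] at hct
        rw [hct]
      have hnotin : '\n' ∉ cs.takeWhile (· ≠ '\n') := by
        intro hmem
        have := List.mem_takeWhile_imp hmem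
        simp at this
      conv_rhs => rw [hdecomp]
      rw [qlines_append _ hnotin]
      simp only [List.all_cons]
      have : qcheck (cs.takeWhile (· ≠ '\n')) = false := by
        have hf : PySem.Chars.startswith cs ['>', ' '] = false := by simpa using hsw
        rw [← prefix_cross (cs.takeWhile (· ≠ '\n')) (cs.dropWhile (· ≠ '\n')).tail, ← hdecomp, hf]
      rw [this, Bool.false_and]
    · rw [qlines_no_nl hm]
      simp only [List.all_cons, List.all_nil, Bool.and_true]
      have hf : PySem.Chars.startswith cs ['>', ' '] = false := by simpa using hsw
      rw [← startswith_eq_qcheck_of_no_nl hm, hf]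

theorem slice2_eq (l : List Char) :
    (PySem.Str.slice (String.ofList l) none (some 2) = "> ") ↔ l.take 2 = ['>', ' '] := by
  rw [← String.toList_inj]
  rw [PySem.Str.toList_slice, PySem.Chars.slice_eq_listSlice, String.toList_ofList]
  rw [show ((2:Int) = ((2:Nat):Int)) from rfl, PySem.List.slice_to_natCast]
  rfl

theorem isqLoop_map (ls : List (List Char)) :
    isqLoop (ls.map String.ofList) = ls.all qcheck := by
  induction ls with
  | nil => rfl
  | cons l rest ih =>
    simp only [List.map_cons, isqLoop, List.all_cons]
    by_cases h : l.take 2 = ['>', ' ']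
    · rw [if_neg (by simpa [slice2_eq] using h), ih]
      simp [qcheck, h]
    · rw [if_pos (by simpa [slice2_eq] using h)]
      simp [qcheck, h]

theorem split_eq (text : String) :
    PySem.Str.split? text "\n" = some (List.map String.ofList (qlines text.toList)) := by
  simp only [PySem.Str.split?, PySem.Chars.split?]
  rw [show ("\n".toList = ['\n']) from rfl]
  simp [splitOn_eq_qlines]

theorem a_eq_altLoop (text : String) : is_quote_block text = altLoop text.toList := by
  rw [is_quote_block]
  by_cases h0 : PySem.Str.len text == 0
  · rw [if_pos h0]
    have : text.toList = [] := by
      rw [PySem.Str.len_eq] at h0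
      simpa [List.length_eq_zero_iff] using h0
    rw [this, altLoop]
    simp [PySem.Chars.startswith, List.isPrefixOf]
  · rw [if_neg h0]
    simp only [split_eq, Option.getD_some]
    rw [isqLoop_map, ← altLoop_eq]

-- ===== VERDICT =====
theorem is_quote_block_spec : Claim_equal_is_quote_block := by
  intro text _
  unfold Spec_is_quote_block is_quote_block_alt
  rw [a_eq_altLoop]
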